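-- pv_equiv track=rewrite | github.com/NishantKumar1301/Dsa-Pratice-Questions | Leetcode/Problem Of The Day/August 2025/august14.py | largestGoodInteger
-- ===== SOURCE A (Python) =====
-- def largestGoodInteger(num):
--     """
--     :type num: str
--     :rtype: str
--     """
--     arr = ['999' , '888' , '777' , '666' , '555', '444','333','222','111','000']
--     ans  = ""
--     for n in arr:
--         if n in num:
--             ans = n
--             break
--     return ans
-- ===== SOURCE B (Python) =====
-- def largestGoodInteger(num):
--     best = None
--     for a, b, c in zip(num, num[1:], num[2:]):
--         if a == b == c and '0' <= a <= '9' and (best is None or a > best):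
--             best = a
--     return best * 3 if best is not None else ""
-- ===== Notes on version B (the rewrite author's own statement) =====
-- stated objective: faster
-- what changed: A probes the string with 10 fixed substring searches ('999' down to '000') and returns the first hit; B makes one left-to-right pass over the character triples, keeping the largest digit that heads a run of three equal digits, and builds the answer from it.
import Mathlib
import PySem

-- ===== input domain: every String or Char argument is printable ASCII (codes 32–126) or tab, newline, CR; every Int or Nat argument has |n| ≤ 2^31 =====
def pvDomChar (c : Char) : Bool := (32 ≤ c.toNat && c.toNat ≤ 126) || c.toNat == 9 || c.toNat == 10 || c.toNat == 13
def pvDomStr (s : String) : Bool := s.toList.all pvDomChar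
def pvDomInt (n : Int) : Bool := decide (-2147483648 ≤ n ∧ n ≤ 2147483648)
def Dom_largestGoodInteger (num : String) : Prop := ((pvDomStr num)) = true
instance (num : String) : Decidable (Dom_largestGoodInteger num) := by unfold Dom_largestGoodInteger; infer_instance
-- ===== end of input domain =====

-- B replaces A's ten fixed substring probes by a single left-to-right scan keeping the largest
-- digit that starts a run of three equal digits (one pass instead of ten searches).


-- ===== PORT A =====
-- the 'for n in arr: if n in num: ans = n; break' loop (ans = "" if no candidate matches)
def pvALoop (num : String) : List String → String
  | [] => ""
  | n :: rest => if PySem.Str.isIn n num then n else pvALoop num rest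

def largestGoodInteger (num : String) : String :=
  pvALoop num ["999", "888", "777", "666", "555", "444", "333", "222", "111", "000"]

-- ===== PORT B =====
-- body of B's for-loop over zip(num, num[1:], num[2:]): keep the largest digit heading a triple
def pvBStep (best : Option Char) (t : Char × Char × Char) : Option Char :=
  if t.1 == t.2.1 && t.2.1 == t.2.2 && decide ('0' ≤ t.1) && decide (t.1 ≤ '9')
      && (match best with | none => true | some d => decide (d < t.1)) then
    some t.1
  else best

def largestGoodInteger_alt (num : String) : String :=
  let l := num.toList
  match (l.zip ((l.drop 1).zip (l.drop 2))).foldl pvBStep none with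
  | some d => String.ofList [d, d, d]   -- best * 3
  | none => ""

-- ===== PRECONDITION & SPEC =====
def Spec_largestGoodInteger (num : String) (out : String) : Prop := out = largestGoodInteger_alt num
instance (num : String) (out : String) : Decidable (Spec_largestGoodInteger num out) := by unfold Spec_largestGoodInteger; infer_instance

-- ===== CLAIM (what is proved, stated in full; the proofs are below) =====
def Claim_equal_largestGoodInteger : Prop := ∀ (num : String), Dom_largestGoodInteger num → Spec_largestGoodInteger num (largestGoodInteger num)

-- ===== LEMMAS AND PROOFS =====

-- 'l contains three consecutive characters equal to c'
def hasT (c : Char) : List Char → Bool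
  | a :: b :: d :: t => (a == c && b == c && d == c) || hasT c (b :: d :: t)
  | _ => false

def trips (l : List Char) : List (Char × Char × Char) := l.zip ((l.drop 1).zip (l.drop 2))

def F (l : List Char) : Option Char := (trips l).foldl pvBStep none

def omax : Option Char → Option Char → Option Char
  | x, none => x
  | none, y => y
  | some a, some b => some (max a b)

def isdig (c : Char) : Prop := '0' ≤ c ∧ c ≤ '9'

lemma alt_eq (num : String) : largestGoodInteger_alt num =
    (match F num.toList with | some d => String.ofList [d, d, d] | none => "") := rfl

lemma omax_none_right (x : Option Char) : omax x none = x := by cases x <;> rfl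

lemma omax_assoc (x y z : Option Char) : omax (omax x y) z = omax x (omax y z) := by
  cases x <;> cases y <;> cases z <;> simp [omax, max_assoc]

lemma bStep_omax (x : Option Char) (t : Char × Char × Char) :
    pvBStep x t = omax x (pvBStep none t) := by
  obtain ⟨a, b, c⟩ := t
  cases x with
  | none => cases pvBStep none (a, b, c) <;> simp [omax]
  | some d =>
    by_cases hb : (a == b && b == c && decide ('0' ≤ a) && decide (a ≤ '9')) = true
    · by_cases hlt : d < a
      · simp [pvBStep, hb, hlt, omax, max_eq_right (le_of_lt hlt)]
      · simp [pvBStep, hb, hlt, omax, max_eq_left (le_of_not_gt hlt)]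
    · simp only [pvBStep] at hb ⊢
      simp only [Bool.and_assoc] at hb ⊢
      rw [if_neg, if_neg, omax_none_right] <;> simp_all
lemma foldl_acc (ts : List (Char × Char × Char)) :
    ∀ x, ts.foldl pvBStep x = omax x (ts.foldl pvBStep none) := by
  induction ts with
  | nil => intro x; simp [omax_none_right]
  | cons t ts ih =>
    intro x
    simp only [List.foldl_cons]
    rw [ih (pvBStep x t), ih (pvBStep none t), bStep_omax x t, omax_assoc]

lemma F_spec (l : List Char) :
    (F l = none ∧ ∀ e, isdig e → hasT e l = false) ∨
    (∃ d, F l = some d ∧ isdig d ∧ hasT d l = true ∧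
      ∀ e, isdig e → hasT e l = true → e ≤ d) := by
  induction l with
  | nil => exact Or.inl ⟨rfl, fun e _ => by simp [hasT]⟩
  | cons a rest ih =>
    rcases rest with _ | ⟨b, rest2⟩
    · exact Or.inl ⟨rfl, fun e _ => by simp [hasT]⟩
    rcases rest2 with _ | ⟨c, t⟩
    · exact Or.inl ⟨rfl, fun e _ => by simp [hasT]⟩
    have hF : F (a :: b :: c :: t) = omax (pvBStep none (a, b, c)) (F (b :: c :: t)) := by
      show (trips (a :: b :: c :: t)).foldl pvBStep none = _
      rw [show trips (a :: b :: c :: t) = (a, b, c) :: trips (b :: c :: t) from rfl]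
      simp only [List.foldl_cons]
      exact foldl_acc _ _
    have hH : ∀ e, hasT e (a :: b :: c :: t)
        = ((a == e && b == e && c == e) || hasT e (b :: c :: t)) := fun e => by
      simp [hasT]
    by_cases hc : a = b ∧ b = c ∧ isdig a
    · obtain ⟨h1, h2, hdg⟩ := hc
      subst h2; subst h1
      have hg : pvBStep none (a, a, a) = some a := by
        simp [pvBStep, hdg.1, hdg.2]
      rcases ih with ⟨hn, hall⟩ | ⟨d, hd, hdig2, hhas, hmax⟩
      · refine Or.inr ⟨a, by rw [hF, hg, hn]; rfl, hdg, by rw [hH]; simp, ?_⟩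
        intro e he hhe
        rw [hH, hall e he] at hhe
        simp at hhe
        exact le_of_eq hhe.symm
      · refine Or.inr ⟨max a d, by rw [hF, hg, hd]; rfl, ?_, ?_, ?_⟩
        · rcases le_total a d with h | h
          · rw [max_eq_right h]; exact hdig2
          · rw [max_eq_left h]; exact hdg
        · rcases le_total a d with h | h
          · rw [max_eq_right h, hH, hhas]; simp
          · rw [max_eq_left h, hH]; simp
        · intro e he hhe
          rw [hH] at hhe
          simp at hhe
          rcases hhe with h | h
          · rw [← h]; exact le_max_left a d
          · exact le_trans (hmax e he h) (le_max_right a d)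
    · have hg : pvBStep none (a, b, c) = none := by
        simp only [pvBStep]
        rw [if_neg]
        simp only [isdig, not_and] at hc
        simp only [Bool.and_true, Bool.and_eq_true, beq_iff_eq, decide_eq_true_eq, not_and]
        intro h; tauto
      rcases ih with ⟨hn, hall⟩ | ⟨d, hd, hdig2, hhas, hmax⟩
      · refine Or.inl ⟨by rw [hF, hg, hn]; rfl, ?_⟩
        intro e he
        rw [hH, hall e he]
        simp only [Bool.or_false]
        cases hv : (a == e && b == e && c == e) with
        | false => rfl
        | true =>
          exfalso
          simp at hv
          exact hc ⟨hv.1.1.trans hv.1.2.symm, hv.1.2.trans hv.2.symm, by rw [hv.1.1]; exact he⟩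
      · refine Or.inr ⟨d, by rw [hF, hg, hd]; rfl, hdig2, by rw [hH, hhas]; simp, ?_⟩
        intro e he hhe
        rw [hH] at hhe
        simp only [Bool.or_eq_true, Bool.and_eq_true, beq_iff_eq] at hhe
        rcases hhe with h | h
        · exact absurd ⟨h.1.1.trans h.1.2.symm, h.1.2.trans h.2.symm, by rw [h.1.1]; exact he⟩ hc
        · exact hmax e he h

lemma infix_iff (c : Char) (l : List Char) : [c, c, c] <:+: l ↔ hasT c l = true := by
  induction l with
  | nil => simp [hasT]
  | cons a t ih =>
    rw [List.infix_cons_iff, ih]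
    rcases t with _ | ⟨b, t2⟩
    · simp [hasT, List.cons_prefix_cons]
    rcases t2 with _ | ⟨d, t3⟩
    · simp [hasT, List.cons_prefix_cons]
    · simp only [hasT, List.cons_prefix_cons, Bool.or_eq_true, Bool.and_eq_true, beq_iff_eq]
      constructor
      · rintro (⟨h1, h2, h3, -⟩ | h)
        · exact Or.inl ⟨⟨h1.symm, h2.symm⟩, h3.symm⟩
        · exact Or.inr h
      · rintro (⟨⟨h1, h2⟩, h3⟩ | h)
        · exact Or.inl ⟨h1.symm, h2.symm, h3.symm, List.nil_prefix⟩
        · exact Or.inr h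

-- A's loop, rephrased over digit characters
def dLoop (l : List Char) : List Char → String
  | [] => ""
  | c :: cs => if hasT c l = true then String.ofList [c, c, c] else dLoop l cs

lemma isIn_triple (d : Char) (num : String) :
    PySem.Str.isIn (String.ofList [d, d, d]) num = hasT d num.toList := by
  rw [Bool.eq_iff_iff, PySem.Str.isIn_iff_infix, String.toList_ofList]
  exact infix_iff d num.toList

lemma A_eq (num : String) :
    largestGoodInteger num = dLoop num.toList ['9', '8', '7', '6', '5', '4', '3', '2', '1', '0'] := by
  show pvALoop num _ = _
  simp only [pvALoop, dLoop,
    show ("999" : String) = String.ofList ['9', '9', '9'] from rfl,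
    show ("888" : String) = String.ofList ['8', '8', '8'] from rfl,
    show ("777" : String) = String.ofList ['7', '7', '7'] from rfl,
    show ("666" : String) = String.ofList ['6', '6', '6'] from rfl,
    show ("555" : String) = String.ofList ['5', '5', '5'] from rfl,
    show ("444" : String) = String.ofList ['4', '4', '4'] from rfl,
    show ("333" : String) = String.ofList ['3', '3', '3'] from rfl,
    show ("222" : String) = String.ofList ['2', '2', '2'] from rfl,
    show ("111" : String) = String.ofList ['1', '1', '1'] from rfl,
    show ("000" : String) = String.ofList ['0', '0', '0'] from rfl,
    isIn_triple]

lemma dLoop_none (l : List Char) : ∀ cs, (∀ c ∈ cs, hasT c l = false) → dLoop l cs = "" := by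
  intro cs
  induction cs with
  | nil => intro _; rfl
  | cons c cs ih =>
    intro h
    simp only [dLoop]
    rw [if_neg (by simp [h c (by simp)])]
    exact ih fun x hx => h x (by simp [hx])

lemma dLoop_some (l : List Char) (d : Char) : ∀ cs, cs.Pairwise (· > ·) → hasT d l = true →
    d ∈ cs → (∀ e ∈ cs, hasT e l = true → e ≤ d) →
    dLoop l cs = String.ofList [d, d, d] := by
  intro cs
  induction cs with
  | nil => intro _ _ h _; simp at h
  | cons c cs ih =>
    intro hpw hhd hmem hmax
    by_cases hc : hasT c l = true
    · have hcd : c ≤ d := hmax c (by simp) hc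
      have hdc : d = c := by
        rcases List.mem_cons.mp hmem with h | h
        · exact h
        · exact absurd hcd (not_le_of_gt ((List.pairwise_cons.mp hpw).1 d h))
      simp only [dLoop]
      rw [if_pos hc, hdc]
    · have hdc : d ≠ c := fun h => hc (h ▸ hhd)
      have hmem' : d ∈ cs := by
        rcases List.mem_cons.mp hmem with h | h
        · exact absurd h hdc
        · exact h
      simp only [dLoop]
      rw [if_neg hc]
      exact ih (List.pairwise_cons.mp hpw).2 hhd hmem' (fun e he => hmax e (by simp [he]))

lemma mem_digits (d : Char) (h : isdig d) :
    d ∈ ['9', '8', '7', '6', '5', '4', '3', '2', '1', '0'] := by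
  obtain ⟨h1, h2⟩ := h
  simp [Char.le_def, UInt32.le_iff_toNat_le] at h1 h2
  have hv : d.toNat = 48 ∨ d.toNat = 49 ∨ d.toNat = 50 ∨ d.toNat = 51 ∨ d.toNat = 52 ∨
      d.toNat = 53 ∨ d.toNat = 54 ∨ d.toNat = 55 ∨ d.toNat = 56 ∨ d.toNat = 57 := by
    omega
  rcases hv with h | h | h | h | h | h | h | h | h | h
  · have : d = '0' := Char.ext (UInt32.toNat_inj.mp (by simpa using h)); simp [this]
  · have : d = '1' := Char.ext (UInt32.toNat_inj.mp (by simpa using h)); simp [this]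
  · have : d = '2' := Char.ext (UInt32.toNat_inj.mp (by simpa using h)); simp [this]
  · have : d = '3' := Char.ext (UInt32.toNat_inj.mp (by simpa using h)); simp [this]
  · have : d = '4' := Char.ext (UInt32.toNat_inj.mp (by simpa using h)); simp [this]
  · have : d = '5' := Char.ext (UInt32.toNat_inj.mp (by simpa using h)); simp [this]
  · have : d = '6' := Char.ext (UInt32.toNat_inj.mp (by simpa using h)); simp [this]
  · have : d = '7' := Char.ext (UInt32.toNat_inj.mp (by simpa using h)); simp [this]
  · have : d = '8' := Char.ext (UInt32.toNat_inj.mp (by simpa using h)); simp [this]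
  · have : d = '9' := Char.ext (UInt32.toNat_inj.mp (by simpa using h)); simp [this]

lemma isdig_of_mem (c : Char) (h : c ∈ ['9', '8', '7', '6', '5', '4', '3', '2', '1', '0']) :
    isdig c := by
  fin_cases h <;> exact ⟨by decide, by decide⟩

-- ===== VERDICT (by name: the statement is the Claim_ definition above) =====
theorem largestGoodInteger_spec : Claim_equal_largestGoodInteger := by
  intro num _
  show largestGoodInteger num = largestGoodInteger_alt num
  rw [A_eq, alt_eq]
  rcases F_spec num.toList with ⟨hn, hall⟩ | ⟨d, hd, hdig, hhas, hmax⟩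
  · rw [hn]
    exact dLoop_none _ _ (fun c hc => hall c (isdig_of_mem c hc))
  · rw [hd]
    exact dLoop_some _ _ _ (by decide) hhas (mem_digits d hdig)
      (fun e he h => hmax e (isdig_of_mem e he) h)
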